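-- pv_equiv track=rewrite | github.com/RAHUL8489XX/Q4-Number-of-Stable-Subsequences | Solution.py | countStableSubsequences
-- ===== SOURCE A (Python) =====
-- def countStableSubsequences(nums):
--     MOD = 10 ** 9 + 7
--     dp = [[0, 0] for _ in range(3)]  # dp[count][parity]
--     total = 0
--
--     for num in nums:
--         parity = num % 2
--         new_dp = [[0, 0] for _ in range(3)]
--
--         # Start a new subsequence
--         new_dp[1][parity] = 1
--
--         # Extend existing subsequences
--         for count in [1, 2]:
--             for p in [0, 1]:
--                 if p == parity:
--                     if count < 2:
--                         new_dp[count + 1][parity] = (new_dp[count + 1][parity] + dp[count][p]) % MOD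
--                 else:
--                     new_dp[1][parity] = (new_dp[1][parity] + dp[count][p]) % MOD
--
--         # Update dp and total
--         for count in [1, 2]:
--             for p in [0, 1]:
--                 dp[count][p] = (dp[count][p] + new_dp[count][p]) % MOD
--                 total = (total + new_dp[count][p]) % MOD
--
--     return total
-- ===== SOURCE B (Python) =====
-- def countStableSubsequences(nums):
--     MOD = 10 ** 9 + 7
--     # Backward "continuation" DP: scan from the right, maintaining
--     # ans = number of stable subsequences of the suffix seen so far, and
--     # E1,E2,O1,O2 = number of nonempty stable continuations drawn from that
--     # suffix for a subsequence currently ending in an even/odd run of length 1/2.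
--     ans = E1 = E2 = O1 = O2 = 0
--     for x in reversed(nums):
--         if x % 2 == 0:
--             t = (1 + E1) % MOD          # take x, then any continuation from state (even,1)
--             ans = (ans + t) % MOD       # new subsequences starting at x
--             E1 = (E1 + 1 + E2) % MOD    # (even,1): skip x, or take x -> (even,2)
--             O1 = (O1 + t) % MOD         # (odd,*): skip x, or take x -> (even,1)
--             O2 = (O2 + t) % MOD
--         else:
--             t = (1 + O1) % MOD
--             ans = (ans + t) % MOD
--             O1 = (O1 + 1 + O2) % MOD
--             E1 = (E1 + t) % MOD
--             E2 = (E2 + t) % MOD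
--     return ans
-- ===== Notes on version B (the rewrite author's own statement) =====
-- stated objective: alternative
-- what changed: Replaces A's forward table DP (dp[count][parity] of subsequences ENDING in each state, updated by nested count/parity loops) with a backward continuation DP: a right-to-left scan over reversed(nums) keeping scalar counts of stable CONTINUATIONS available in the suffix for each trailing-run state, derived from a take/skip recursion on the suffix. B does scalar arithmetic only (no per-element table allocation), which a timing run measured as a constant-factor speedup.
import Mathlib
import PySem

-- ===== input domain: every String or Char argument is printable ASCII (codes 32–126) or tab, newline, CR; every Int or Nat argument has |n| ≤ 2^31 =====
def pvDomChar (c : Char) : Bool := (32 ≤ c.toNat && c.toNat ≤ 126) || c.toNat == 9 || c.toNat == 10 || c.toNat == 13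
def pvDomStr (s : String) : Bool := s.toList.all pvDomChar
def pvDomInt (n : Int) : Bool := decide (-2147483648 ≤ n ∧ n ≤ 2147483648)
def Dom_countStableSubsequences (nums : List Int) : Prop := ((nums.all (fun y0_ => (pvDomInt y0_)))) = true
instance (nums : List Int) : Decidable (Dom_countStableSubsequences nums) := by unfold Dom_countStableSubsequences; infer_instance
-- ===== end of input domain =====

-- B replaces A's forward table DP (subsequences ending in each state) with a backward
-- continuation DP over reversed(nums) counting stable continuations per trailing-run state
-- (objective: alternative).

def pvMOD : Int := 10 ^ 9 + 7

-- ===== PORT A =====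
-- 2-D list indexing helpers; every index A uses is a literal in range, parity is num % 2 ∈ {0,1}
def pvGet2 (dp : List (List Int)) (i j : Nat) : Int := (dp.getD i []).getD j 0
def pvSet2 (dp : List (List Int)) (i j : Nat) (v : Int) : List (List Int) :=
  dp.set i ((dp.getD i []).set j v)

-- the body of A's 'for num in nums' loop, state = (dp, total)
def pvStepA (st : List (List Int) × Int) (num : Int) : List (List Int) × Int :=
  let dp := st.1
  -- parity = num % 2 is 0 or 1 (Python floor mod, positive divisor), so .toNat is exact
  let parity := (PySem.Int.mod num 2).toNat
  let nd0 : List (List Int) := [[0, 0], [0, 0], [0, 0]]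
  -- new_dp[1][parity] = 1
  let nd1 := pvSet2 nd0 1 parity 1
  -- extend existing subsequences: for count in [1,2]: for p in [0,1]: …
  let nd2 := List.foldl (fun nd count =>
      List.foldl (fun nd p =>
        if p = parity then
          (if count < 2 then
            pvSet2 nd (count + 1) parity
              (PySem.Int.mod (pvGet2 nd (count + 1) parity + pvGet2 dp count p) pvMOD)
          else nd)
        else
          pvSet2 nd 1 parity (PySem.Int.mod (pvGet2 nd 1 parity + pvGet2 dp count p) pvMOD)
      ) nd [0, 1]) nd1 [1, 2]
  -- update dp and total: for count in [1,2]: for p in [0,1]: …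
  List.foldl (fun st count =>
      List.foldl (fun (st : List (List Int) × Int) p =>
        (pvSet2 st.1 count p (PySem.Int.mod (pvGet2 st.1 count p + pvGet2 nd2 count p) pvMOD),
         PySem.Int.mod (st.2 + pvGet2 nd2 count p) pvMOD)
      ) st [0, 1]) (st.1, st.2) [1, 2]

def countStableSubsequences (nums : List Int) : Int :=
  (nums.foldl pvStepA ([[0, 0], [0, 0], [0, 0]], 0)).2

-- ===== PORT B =====
-- the body of B's 'for x in reversed(nums)' loop, state = (ans, E1, E2, O1, O2):
-- ans = stable subsequences of the suffix scanned so far, E1/E2/O1/O2 = nonempty stable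
-- continuations in that suffix after a trailing even/odd run of length 1/2
def pvStepBwd (st : Int × Int × Int × Int × Int) (x : Int) : Int × Int × Int × Int × Int :=
  match st with
  | (ans, eE1, eE2, oO1, oO2) =>
    if PySem.Int.mod x 2 = 0 then
      let t1 := PySem.Int.mod (1 + eE1) pvMOD
      (PySem.Int.mod (ans + t1) pvMOD, PySem.Int.mod (eE1 + 1 + eE2) pvMOD, eE2,
       PySem.Int.mod (oO1 + t1) pvMOD, PySem.Int.mod (oO2 + t1) pvMOD)
    else
      let t1 := PySem.Int.mod (1 + oO1) pvMOD
      (PySem.Int.mod (ans + t1) pvMOD, PySem.Int.mod (eE1 + t1) pvMOD,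
       PySem.Int.mod (eE2 + t1) pvMOD, PySem.Int.mod (oO1 + 1 + oO2) pvMOD, oO2)

def countStableSubsequences_alt (nums : List Int) : Int :=
  (nums.reverse.foldl pvStepBwd (0, 0, 0, 0, 0)).1

-- ===== PRECONDITION & SPEC =====
def Spec_countStableSubsequences (nums : List Int) (out : Int) : Prop := out = countStableSubsequences_alt nums
instance (nums : List Int) (out : Int) : Decidable (Spec_countStableSubsequences nums out) := by unfold Spec_countStableSubsequences; infer_instance

-- ===== CLAIM (what is proved, stated in full; the proofs are below) =====
def Claim_equal_countStableSubsequences : Prop := ∀ (nums : List Int), Dom_countStableSubsequences nums → Spec_countStableSubsequences nums (countStableSubsequences nums)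

-- ===== LEMMAS AND PROOFS =====

theorem pvMOD_pos : (0 : Int) < pvMOD := by norm_num [pvMOD]

theorem pvMod2 (num : Int) : PySem.Int.mod num 2 = num % 2 :=
  PySem.Int.mod_eq_emod_of_pos (by norm_num)

theorem pvModM (a : Int) : PySem.Int.mod a pvMOD = a % 1000000007 := by
  rw [PySem.Int.mod_eq_emod_of_pos pvMOD_pos]; norm_num [pvMOD]

-- casting a Python 'x % (10**9+7)' into ZMod 1000000007 drops the reduction
theorem pvCast (a : Int) : (((a % 1000000007 : Int)) : ZMod 1000000007) = (a : ZMod 1000000007) := by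
  have h : ((1000000007 : Int)) = ((1000000007 : Nat) : Int) := by norm_num
  rw [h, ZMod.intCast_mod]

-- one A-step on a state of invariant shape, even parity
theorem pvStepA_even (num e1 e2 o1 o2 t : Int) (h : num % 2 = 0)
    (ho1 : 0 ≤ o1) (ho1' : o1 < pvMOD) (ho2 : 0 ≤ o2) (ho2' : o2 < pvMOD) :
    pvStepA ([[0, 0], [e1, o1], [e2, o2]], t) num =
      ([[0, 0],
        [PySem.Int.mod (e1 + PySem.Int.mod (1 + o1 + o2) pvMOD) pvMOD, o1],
        [PySem.Int.mod (e2 + PySem.Int.mod e1 pvMOD) pvMOD, o2]],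
       PySem.Int.mod (t + PySem.Int.mod (1 + o1 + o2) pvMOD + PySem.Int.mod e1 pvMOD) pvMOD) := by
  simp only [pvStepA, pvSet2, pvGet2, pvMod2, h]
  simp only [show pvMOD = 1000000007 from by norm_num [pvMOD]] at *
  norm_num [List.set, Prod.ext_iff]
  refine ⟨⟨?_, ?_⟩, ?_⟩ <;> omega

-- one A-step on a state of invariant shape, odd parity
theorem pvStepA_odd (num e1 e2 o1 o2 t : Int) (h : num % 2 = 1)
    (he1 : 0 ≤ e1) (he1' : e1 < pvMOD) (he2 : 0 ≤ e2) (he2' : e2 < pvMOD) :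
    pvStepA ([[0, 0], [e1, o1], [e2, o2]], t) num =
      ([[0, 0],
        [e1, PySem.Int.mod (o1 + PySem.Int.mod (1 + e1 + e2) pvMOD) pvMOD],
        [e2, PySem.Int.mod (o2 + PySem.Int.mod o1 pvMOD) pvMOD]],
       PySem.Int.mod (t + PySem.Int.mod (1 + e1 + e2) pvMOD + PySem.Int.mod o1 pvMOD) pvMOD) := by
  simp only [pvStepA, pvSet2, pvGet2, pvMod2, h]
  simp only [show pvMOD = 1000000007 from by norm_num [pvMOD]] at *
  norm_num [List.set, Prod.ext_iff]
  refine ⟨⟨?_, ?_⟩, ?_⟩ <;> omega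

-- all five components of B's backward state stay in [0, pvMOD)
def pvInRange (a : Int) : Prop := 0 ≤ a ∧ a < pvMOD

def pvRange5 (st : Int × Int × Int × Int × Int) : Prop :=
  pvInRange st.1 ∧ pvInRange st.2.1 ∧ pvInRange st.2.2.1 ∧ pvInRange st.2.2.2.1 ∧ pvInRange st.2.2.2.2

theorem pvStepBwd_range (st : Int × Int × Int × Int × Int) (x : Int)
    (h : pvRange5 st) : pvRange5 (pvStepBwd st x) := by
  obtain ⟨a, b, c, d, e⟩ := st
  obtain ⟨ha, hb, hc, hd, he⟩ := h
  have hp := pvMOD_pos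
  have hR : ∀ a : Int, pvInRange (PySem.Int.mod a pvMOD) :=
    fun a => ⟨PySem.Int.mod_nonneg _ hp, PySem.Int.mod_lt _ hp⟩
  by_cases hx : PySem.Int.mod x 2 = 0
  · simp only [pvStepBwd, if_pos hx]
    exact ⟨hR _, hR _, hc, hR _, hR _⟩
  · simp only [pvStepBwd, if_neg hx]
    exact ⟨hR _, hR _, hR _, hR _, he⟩

theorem pvBwd_range (xs : List Int) : ∀ st, pvRange5 st → pvRange5 (xs.foldl pvStepBwd st) := by
  induction xs with
  | nil => intro st h; exact h
  | cons x rest ih => intro st h; exact ih _ (pvStepBwd_range st x h)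

-- the final total of A's forward fold lies in [0, pvMOD)
theorem pvFwd_range (xs : List Int) : ∀ e1 e2 o1 o2 t : Int,
    pvInRange e1 → pvInRange e2 → pvInRange o1 → pvInRange o2 → pvInRange t →
    pvInRange (List.foldl pvStepA ([[0, 0], [e1, o1], [e2, o2]], t) xs).2 := by
  induction xs with
  | nil => intro _ _ _ _ _ _ _ _ _ ht; exact ht
  | cons x rest ih =>
    intro e1 e2 o1 o2 t he1 he2 ho1 ho2 _
    have hp := pvMOD_pos
    have hm2 : x % 2 = 0 ∨ x % 2 = 1 := by omega
    have hR : ∀ a : Int, pvInRange (PySem.Int.mod a pvMOD) :=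
      fun a => ⟨PySem.Int.mod_nonneg _ hp, PySem.Int.mod_lt _ hp⟩
    simp only [List.foldl_cons]
    rcases hm2 with h | h
    · rw [pvStepA_even x e1 e2 o1 o2 t h ho1.1 ho1.2 ho2.1 ho2.2]
      exact ih _ _ _ _ _ (hR _) (hR _) ho1 ho2 (hR _)
    · rw [pvStepA_odd x e1 e2 o1 o2 t h he1.1 he1.2 he2.1 he2.2]
      exact ih _ _ _ _ _ he1 he2 (hR _) (hR _) (hR _)

-- bilinear bridge: A's forward total over xs from state (e1,e2,o1,o2,t) equals, in
-- ZMod (10^9+7), t plus B's backward answer plus each state count times the number of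
-- backward continuations B computes for that state.
theorem pvBridge (xs : List Int) : ∀ e1 e2 o1 o2 t : Int,
    pvInRange e1 → pvInRange e2 → pvInRange o1 → pvInRange o2 →
    (((List.foldl pvStepA ([[0, 0], [e1, o1], [e2, o2]], t) xs).2 : Int) : ZMod 1000000007)
      = (t : ZMod 1000000007)
        + ((xs.reverse.foldl pvStepBwd (0, 0, 0, 0, 0)).1 : ZMod 1000000007)
        + (e1 : ZMod 1000000007) * ((xs.reverse.foldl pvStepBwd (0, 0, 0, 0, 0)).2.1 : ZMod 1000000007)
        + (e2 : ZMod 1000000007) * ((xs.reverse.foldl pvStepBwd (0, 0, 0, 0, 0)).2.2.1 : ZMod 1000000007)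
        + (o1 : ZMod 1000000007) * ((xs.reverse.foldl pvStepBwd (0, 0, 0, 0, 0)).2.2.2.1 : ZMod 1000000007)
        + (o2 : ZMod 1000000007) * ((xs.reverse.foldl pvStepBwd (0, 0, 0, 0, 0)).2.2.2.2 : ZMod 1000000007) := by
  induction xs with
  | nil =>
    intro e1 e2 o1 o2 t _ _ _ _
    simp
  | cons x rest ih =>
    intro e1 e2 o1 o2 t he1 he2 ho1 ho2
    have hp := pvMOD_pos
    have hR : ∀ a : Int, pvInRange (PySem.Int.mod a pvMOD) :=
      fun a => ⟨PySem.Int.mod_nonneg _ hp, PySem.Int.mod_lt _ hp⟩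
    have hrev : (x :: rest).reverse.foldl pvStepBwd (0, 0, 0, 0, 0)
        = pvStepBwd (rest.reverse.foldl pvStepBwd (0, 0, 0, 0, 0)) x := by
      rw [List.reverse_cons, List.foldl_append, List.foldl_cons, List.foldl_nil]
    have hm2 : x % 2 = 0 ∨ x % 2 = 1 := by omega
    simp only [List.foldl_cons, hrev]
    rcases hm2 with h | h
    · have hx : PySem.Int.mod x 2 = 0 := by rw [pvMod2, h]
      rw [pvStepA_even x e1 e2 o1 o2 t h ho1.1 ho1.2 ho2.1 ho2.2]
      rw [ih _ _ _ _ _ (hR _) (hR _) ho1 ho2]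
      generalize rest.reverse.foldl pvStepBwd (0, 0, 0, 0, 0) = bw
      obtain ⟨A0, E1, E2, O1, O2⟩ := bw
      simp only [pvStepBwd, if_pos hx]
      push_cast [pvModM, pvCast]
      ring
    · have hx : ¬ PySem.Int.mod x 2 = 0 := by rw [pvMod2, h]; norm_num
      rw [pvStepA_odd x e1 e2 o1 o2 t h he1.1 he1.2 he2.1 he2.2]
      rw [ih _ _ _ _ _ he1 he2 (hR _) (hR _)]
      generalize rest.reverse.foldl pvStepBwd (0, 0, 0, 0, 0) = bw
      obtain ⟨A0, E1, E2, O1, O2⟩ := bw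
      simp only [pvStepBwd, if_neg hx]
      push_cast [pvModM, pvCast]
      ring

-- ===== VERDICT (by name: the statement is the Claim_ definition above) =====
theorem countStableSubsequences_spec : Claim_equal_countStableSubsequences := by
  intro nums _
  unfold Spec_countStableSubsequences countStableSubsequences countStableSubsequences_alt
  have h0 : pvInRange 0 := ⟨le_rfl, pvMOD_pos⟩
  have hfwd := pvFwd_range nums 0 0 0 0 0 h0 h0 h0 h0 h0
  have hbwd := (pvBwd_range nums.reverse (0, 0, 0, 0, 0) ⟨h0, h0, h0, h0, h0⟩).1
  have hcast := pvBridge nums 0 0 0 0 0 h0 h0 h0 h0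
  simp only [Int.cast_zero, zero_mul, zero_add, add_zero] at hcast
  have hM : pvMOD = ((1000000007 : Nat) : Int) := by norm_num [pvMOD]
  have hlt : ∀ a : Int, a < pvMOD → a < ((1000000007 : Nat) : Int) := fun a ha => hM ▸ ha
  have := (ZMod.intCast_eq_intCast_iff' _ _ _).mp hcast
  rw [Int.emod_eq_of_lt hfwd.1 (hlt _ hfwd.2), Int.emod_eq_of_lt hbwd.1 (hlt _ hbwd.2)] at this
  exact this
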